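-- pv_equiv track=rewrite | github.com/AtlantaEmrys2002/LEO_Satellite_Network_Topology_Design | heuristic_topology_design_algorithm_isls.py | increase_connectivity
-- ===== SOURCE A (Python) =====
-- def increase_connectivity(network, constraints, current_connection_number, costs):
--
--     available_isls = []
--
--     # Ignore all ISLs already established
--     for i in range(len(network)):
--         for j in range(i+1, len(network)):
--             if network[i][j] == 1:
--                 costs[i][j] = -1
--             else:
--                 if costs[i][j] != -1:
--                     available_isls.append([costs[i][j], [i, j]])
--
--     # Sort list of available ISLs in order of increasing cost
--     available_isls.sort()
--
--     for k in available_isls: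
--         satellites = k[1]
--         if (current_connection_number[satellites[0]] == constraints[satellites[0]]) or (current_connection_number[satellites[1]] == constraints[satellites[1]]):
--             continue
--         else:
--             network[satellites[0]][satellites[1]] = 1
--             network[satellites[1]][satellites[0]] = 1
--
--     return network
-- ===== SOURCE B (Python) =====
-- def increase_connectivity(network, constraints, current_connection_number, costs):
--     # Functional rebuild: compute each cell of the result directly from the ORIGINAL
--     # inputs (counts and costs are never updated by the algorithm, so each cell is
--     # independent).  No intermediate list, no sort, no in-place mutation; the
--     # RETURN value is identical to A's (A also mutates network/costs in place).
--     n = len(network)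
--
--     def linked(a, b):
--         return (network[a][b] != 1 and costs[a][b] != -1
--                 and current_connection_number[a] != constraints[a]
--                 and current_connection_number[b] != constraints[b])
--
--     return [[1 if (i != j and j < n and linked(min(i, j), max(i, j)))
--              else network[i][j]
--              for j in range(len(network[i]))]
--             for i in range(n)]
-- ===== Notes on version B (the rewrite author's own statement) =====
-- stated objective: faster
-- what changed: Replaces A's three imperative phases (collect available ISLs, sort by cost, iterate mutating the matrix) by a purely functional per-cell rebuild: each output cell is computed directly from the original inputs by one closed predicate, with no intermediate list, no sort and no mutation (exact because connection counts are never updated, so addition order is irrelevant and cells are independent); equivalence is about the return value only (A mutates network and costs in place, B does not).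
import Mathlib
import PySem

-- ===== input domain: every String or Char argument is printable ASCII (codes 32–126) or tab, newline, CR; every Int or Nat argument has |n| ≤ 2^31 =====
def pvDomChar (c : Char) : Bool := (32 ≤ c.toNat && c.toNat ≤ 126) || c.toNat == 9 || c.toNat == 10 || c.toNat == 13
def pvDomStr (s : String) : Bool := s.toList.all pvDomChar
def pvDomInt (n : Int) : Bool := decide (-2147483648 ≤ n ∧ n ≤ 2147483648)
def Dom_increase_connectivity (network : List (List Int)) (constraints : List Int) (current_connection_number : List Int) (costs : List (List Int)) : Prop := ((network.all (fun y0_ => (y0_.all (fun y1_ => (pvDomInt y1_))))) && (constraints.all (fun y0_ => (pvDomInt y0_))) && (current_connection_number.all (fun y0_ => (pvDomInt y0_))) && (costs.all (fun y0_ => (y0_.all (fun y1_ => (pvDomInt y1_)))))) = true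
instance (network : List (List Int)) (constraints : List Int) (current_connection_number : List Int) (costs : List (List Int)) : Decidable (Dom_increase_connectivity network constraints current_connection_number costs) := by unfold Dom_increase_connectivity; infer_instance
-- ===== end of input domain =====

-- B rebuilds the result matrix cell by cell from the original inputs (objective: faster — the sort is removed;
-- a timing run measured B faster on its generated inputs); in Python A mutates `network` and `costs` in
-- place while B does not: the theorems are about the RETURNED matrix only.

-- small helpers: m[i][j] read and in-place write m[i][j] = v (Python semantics totalized
-- with defaults; every access is in range on inputs satisfying Pre_)
def pvGet2 (m : List (List Int)) (i j : Nat) : Int := (m.getD i []).getD j 0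
def pvSet2 (m : List (List Int)) (i j : Nat) (v : Int) : List (List Int) := m.set i ((m.getD i []).set j v)

-- ===== PORT A =====
-- `available_isls.sort()` compares [cost,[i,j]] lexicographically; since the list is collected with
-- (i,j) strictly increasing in the same lexicographic order, Python's sort coincides with the STABLE
-- sort by cost alone, which is PySem.List.sorted with key = cost.
def increase_connectivity (network : List (List Int)) (constraints : List Int) (current_connection_number : List Int) (costs : List (List Int)) : List (List Int) :=
  let n := network.length
  let st := (List.range n).foldl (fun (st : List (List Int) × List (Int × Nat × Nat)) i =>
      (List.range' (i+1) (n - (i+1))).foldl (fun st j =>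
        if pvGet2 network i j = 1 then (pvSet2 st.1 i j (-1), st.2)
        else if pvGet2 st.1 i j ≠ -1 then (st.1, st.2 ++ [(pvGet2 st.1 i j, i, j)])
        else st) st) (costs, [])
  let available_isls := PySem.List.sorted st.2 (fun t => t.1) false
  available_isls.foldl (fun net k =>
    if current_connection_number.getD k.2.1 0 = constraints.getD k.2.1 0 ∨
       current_connection_number.getD k.2.2 0 = constraints.getD k.2.2 0 then net
    else pvSet2 (pvSet2 net k.2.1 k.2.2 1) k.2.2 k.2.1 1) network

-- ===== PORT B =====
-- B's helper `linked(a,b)` (reads only the ORIGINAL inputs, in Source B's short-circuit order)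
def pvLinked (network costs : List (List Int)) (constraints current_connection_number : List Int) (a b : Nat) : Bool :=
  (pvGet2 network a b != 1) && (pvGet2 costs a b != -1) &&
  (current_connection_number.getD a 0 != constraints.getD a 0) &&
  (current_connection_number.getD b 0 != constraints.getD b 0)

def increase_connectivity_alt (network : List (List Int)) (constraints : List Int) (current_connection_number : List Int) (costs : List (List Int)) : List (List Int) :=
  let n := network.length
  (List.range n).map (fun i =>
    (List.range (network.getD i []).length).map (fun j =>
      if i ≠ j ∧ j < n ∧ pvLinked network costs constraints current_connection_number (min i j) (max i j) = true
      then 1 else pvGet2 network i j))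

-- ===== PRECONDITION & SPEC =====
-- Pre_ is exactly the set of inputs on which the Python A returns normally (elsewhere it raises
-- IndexError): every access the two loops perform must be in range, including the short-circuit
-- order of the constraint reads.
def pvPreOK (network : List (List Int)) (constraints : List Int) (current_connection_number : List Int) (costs : List (List Int)) : Bool :=
  (List.range network.length).all fun i =>
    (List.range' (i+1) (network.length - (i+1))).all fun j =>
      decide (j < (network.getD i []).length) && decide (i < costs.length) &&
      decide (j < (costs.getD i []).length) &&
      (!(decide (pvGet2 network i j ≠ 1) && decide (pvGet2 costs i j ≠ -1)) ||
        (decide (i < current_connection_number.length) && decide (i < constraints.length) &&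
         (!decide (current_connection_number.getD i 0 ≠ constraints.getD i 0) ||
          (decide (j < current_connection_number.length) && decide (j < constraints.length) &&
           (!decide (current_connection_number.getD j 0 ≠ constraints.getD j 0) ||
            decide (i < (network.getD j []).length))))))

def Pre_increase_connectivity (network : List (List Int)) (constraints : List Int) (current_connection_number : List Int) (costs : List (List Int)) : Prop :=
  pvPreOK network constraints current_connection_number costs = true
instance (network : List (List Int)) (constraints : List Int) (current_connection_number : List Int) (costs : List (List Int)) : Decidable (Pre_increase_connectivity network constraints current_connection_number costs) := by unfold Pre_increase_connectivity; infer_instance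

def pvWitness_increase_connectivity : List (List Int) × List Int × List Int × List (List Int) :=
  ([[0, 0, 1], [0, 0, 0], [1, 0, 0]], [2, 2, 2], [1, 2, 1], [[9, 5, 3], [5, 9, 4], [3, 4, 9]])

def Spec_increase_connectivity (network : List (List Int)) (constraints : List Int) (current_connection_number : List Int) (costs : List (List Int)) (out : List (List Int)) : Prop := out = increase_connectivity_alt network constraints current_connection_number costs
instance (network : List (List Int)) (constraints : List Int) (current_connection_number : List Int) (costs : List (List Int)) (out : List (List Int)) : Decidable (Spec_increase_connectivity network constraints current_connection_number costs out) := by unfold Spec_increase_connectivity; infer_instance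

-- ===== CLAIM (what is proved, stated in full; the proofs are below) =====
def Claim_equal_increase_connectivity : Prop := ∀ (network : List (List Int)) (constraints : List Int) (current_connection_number : List Int) (costs : List (List Int)), Dom_increase_connectivity network constraints current_connection_number costs → Pre_increase_connectivity network constraints current_connection_number costs → Spec_increase_connectivity network constraints current_connection_number costs (increase_connectivity network constraints current_connection_number costs)

-- ===== LEMMAS AND PROOFS =====

@[simp] theorem pvSet2_length (m : List (List Int)) (i j : Nat) (v : Int) :
    (pvSet2 m i j v).length = m.length := by simp [pvSet2]

theorem listGetD_eq (l : List Int) (n : Nat) : l.getD n 0 = (l[n]?).getD 0 := List.getD_eq_getElem?_getD ..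
theorem rowGetD_eq (m : List (List Int)) (n : Nat) : m.getD n [] = (m[n]?).getD [] := List.getD_eq_getElem?_getD ..

theorem pvRow_set2 (m : List (List Int)) (i j : Nat) (v : Int) (a : Nat) :
    (pvSet2 m i j v).getD a [] =
      if a = i ∧ i < m.length then (m.getD i []).set j v else m.getD a [] := by
  rw [pvSet2, rowGetD_eq, List.getElem?_set]
  by_cases h1 : a = i
  · subst h1
    by_cases h2 : a < m.length
    · rw [if_pos rfl, if_pos h2, if_pos ⟨rfl, h2⟩, Option.getD_some]
    · rw [if_pos rfl, if_neg h2, if_neg (by tauto), rowGetD_eq,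
        List.getElem?_eq_none (by omega)]
  · rw [if_neg (fun h => h1 h.symm), if_neg (by tauto), rowGetD_eq]

theorem pvGet2_set2 (m : List (List Int)) (i j : Nat) (v : Int) (a b : Nat) :
    pvGet2 (pvSet2 m i j v) a b =
      if a = i ∧ b = j ∧ i < m.length ∧ j < (m.getD i []).length then v
      else pvGet2 m a b := by
  rw [pvGet2, pvRow_set2]
  by_cases hai : a = i
  · subst hai
    by_cases hl : a < m.length
    · rw [if_pos ⟨rfl, hl⟩, listGetD_eq, List.getElem?_set]
      by_cases hbj : j = b
      · subst hbj
        by_cases hjr : j < (m.getD a []).length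
        · rw [if_pos rfl, if_pos hjr, if_pos ⟨rfl, rfl, hl, hjr⟩, Option.getD_some]
        · rw [if_pos rfl, if_neg hjr, if_neg (by tauto), pvGet2, listGetD_eq,
            List.getElem?_eq_none (by omega)]
      · rw [if_neg hbj, if_neg (by rintro ⟨-, rfl, -, -⟩; exact hbj rfl), pvGet2, listGetD_eq]
    · rw [if_neg (by tauto), if_neg (by tauto), pvGet2]
  · rw [if_neg (by tauto), if_neg (by tauto), pvGet2]

@[simp] theorem pvRow_len_set2 (m : List (List Int)) (i j : Nat) (v : Int) (a : Nat) :
    ((pvSet2 m i j v).getD a []).length = (m.getD a []).length := by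
  rw [pvRow_set2]
  split_ifs with h
  · obtain ⟨rfl, -⟩ := h
    simp
  · rfl

-- the pair list i < j < n in the scan order of A's nested loops
def pvPairs (n : Nat) : List (Nat × Nat) :=
  (List.range n).flatMap (fun i => (List.range' (i+1) (n-(i+1))).map (fun j => (i, j)))

theorem mem_pvPairs (n : Nat) (p : Nat × Nat) : p ∈ pvPairs n ↔ p.1 < p.2 ∧ p.2 < n := by
  cases p with
  | mk a b =>
    simp only [pvPairs, List.mem_flatMap, List.mem_range, List.mem_map, List.mem_range'_1,
      Prod.mk.injEq]
    constructor
    · rintro ⟨i, hi, j, ⟨hj1, hj2⟩, rfl, rfl⟩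
      omega
    · rintro ⟨h1, h2⟩
      exact ⟨a, by omega, b, ⟨by omega, by omega⟩, rfl, rfl⟩

theorem nodup_pvPairs (n : Nat) : (pvPairs n).Nodup := by
  rw [pvPairs, List.nodup_flatMap]
  refine ⟨fun i _ => ?_, ?_⟩
  · exact (List.nodup_range' ..).map (fun x y h => by simpa using (Prod.mk.inj h).2)
  · have : (List.range n).Pairwise (· ≠ ·) := (List.nodup_range)
    refine this.imp ?_
    intro i₁ i₂ hne x hx1 hx2
    obtain ⟨j₁, _, rfl⟩ := List.mem_map.mp hx1
    obtain ⟨j₂, _, h⟩ := List.mem_map.mp hx2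
    exact hne (Prod.mk.inj h.symm).1

-- A's nested for-loops are a single fold over pvPairs
theorem foldl_pvPairs {σ : Type} (F : σ → Nat × Nat → σ) (n : Nat) (init : σ) :
    (List.range n).foldl (fun st i =>
        (List.range' (i+1) (n - (i+1))).foldl (fun st j => F st (i, j)) st) init
    = (pvPairs n).foldl F init := by
  simp [pvPairs, List.foldl_flatMap, List.foldl_map]

-- predicates over the ORIGINAL inputs
def pvOKb (constraints current_connection_number : List Int) (i j : Nat) : Bool :=
  (current_connection_number.getD i 0 != constraints.getD i 0) &&
  (current_connection_number.getD j 0 != constraints.getD j 0)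

def pvAvailb (network costs : List (List Int)) (i j : Nat) : Bool :=
  (pvGet2 network i j != 1) && (pvGet2 costs i j != -1)

def pvAddb (network : List (List Int)) (constraints current_connection_number : List Int) (costs : List (List Int)) (i j : Nat) : Bool :=
  pvAvailb network costs i j && pvOKb constraints current_connection_number i j

theorem pvLinked_eq_addb (network costs : List (List Int)) (constraints current_connection_number : List Int) (a b : Nat) :
    pvLinked network costs constraints current_connection_number a b =
      pvAddb network constraints current_connection_number costs a b := by
  simp [pvLinked, pvAddb, pvAvailb, pvOKb, Bool.and_assoc]

-- A's first loop, as a step over one pair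
def pvStepA1 (network : List (List Int)) (st : List (List Int) × List (Int × Nat × Nat)) (p : Nat × Nat) : List (List Int) × List (Int × Nat × Nat) :=
  if pvGet2 network p.1 p.2 = 1 then (pvSet2 st.1 p.1 p.2 (-1), st.2)
  else if pvGet2 st.1 p.1 p.2 ≠ -1 then (st.1, st.2 ++ [(pvGet2 st.1 p.1 p.2, p.1, p.2)])
  else st

-- A's second loop, as a step over one collected triple
def pvStepA2 (constraints current_connection_number : List Int) (net : List (List Int)) (k : Int × Nat × Nat) : List (List Int) :=
  if current_connection_number.getD k.2.1 0 = constraints.getD k.2.1 0 ∨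
     current_connection_number.getD k.2.2 0 = constraints.getD k.2.2 0 then net
  else pvSet2 (pvSet2 net k.2.1 k.2.2 1) k.2.2 k.2.1 1

-- A's first loop collects exactly the available pairs with their (original) costs
theorem phase1_avail (network costs : List (List Int)) (L : List (Nat × Nat))
    (c : List (List Int)) (acc : List (Int × Nat × Nat))
    (hN : L.Nodup)
    (hfresh : ∀ p ∈ L, pvGet2 c p.1 p.2 = pvGet2 costs p.1 p.2) :
    (L.foldl (pvStepA1 network) (c, acc)).2 =
      acc ++ (L.filter (fun p => pvAvailb network costs p.1 p.2)).map
        (fun p => (pvGet2 costs p.1 p.2, p.1, p.2)) := by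
  induction L generalizing c acc with
  | nil => simp
  | cons p L ih =>
    obtain ⟨hpL, hN'⟩ := List.nodup_cons.mp hN
    have hc := hfresh p (List.mem_cons_self ..)
    have hfresh' : ∀ q ∈ L, pvGet2 c q.1 q.2 = pvGet2 costs q.1 q.2 :=
      fun q hq => hfresh q (List.mem_cons_of_mem _ hq)
    rw [List.foldl_cons]
    by_cases h1 : pvGet2 network p.1 p.2 = 1
    · have hstep : pvStepA1 network (c, acc) p = (pvSet2 c p.1 p.2 (-1), acc) := by
        simp [pvStepA1, h1]
      rw [hstep, ih _ _ hN' ?_]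
      · have : pvAvailb network costs p.1 p.2 = false := by
          simp [pvAvailb, h1]
        simp [this]
      · intro q hq
        rw [pvGet2_set2, if_neg ?_, hfresh' q hq]
        rintro ⟨e1, e2, -, -⟩
        exact hpL (by
          have : q = p := Prod.ext (e1.symm) (e2.symm) ▸ rfl
          rw [← Prod.mk.eta (p := q), e1, e2, Prod.mk.eta] at hq
          exact hq)
    · by_cases h2 : pvGet2 costs p.1 p.2 ≠ -1
      · have hstep : pvStepA1 network (c, acc) p =
            (c, acc ++ [(pvGet2 costs p.1 p.2, p.1, p.2)]) := by
          simp [pvStepA1, h1, hc, h2]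
        rw [hstep, ih _ _ hN' hfresh']
        have : pvAvailb network costs p.1 p.2 = true := by
          simp [pvAvailb, h1, h2]
        simp [this]
      · have hstep : pvStepA1 network (c, acc) p = (c, acc) := by
          simp [pvStepA1, h1, hc, h2]
        rw [hstep, ih _ _ hN' hfresh']
        have : pvAvailb network costs p.1 p.2 = false := by
          simp only [pvAvailb]
          simp only [ne_eq, not_not] at h2
          simp [h2]
        simp [this]

-- cellwise value of A's second loop
theorem phase2_char (constraints current_connection_number : List Int)
    (L : List (Int × Nat × Nat)) (net : List (List Int))
    (hS : ∀ k ∈ L, k.2.1 < k.2.2) :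
    ((L.foldl (pvStepA2 constraints current_connection_number) net).length = net.length ∧
     ∀ a, ((L.foldl (pvStepA2 constraints current_connection_number) net).getD a []).length = (net.getD a []).length) ∧
    ∀ a b, a < net.length → b < (net.getD a []).length →
      pvGet2 (L.foldl (pvStepA2 constraints current_connection_number) net) a b =
        if ((a, b) ∈ L.map (fun k => k.2) ∨ (b, a) ∈ L.map (fun k => k.2)) ∧
           pvOKb constraints current_connection_number a b = true then 1
        else pvGet2 net a b := by
  induction L generalizing net with
  | nil => simp
  | cons k L ih =>
    obtain ⟨cc0, i, j⟩ := k
    have hij : i < j := hS _ (List.mem_cons_self ..)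
    have hS' : ∀ k ∈ L, k.2.1 < k.2.2 := fun k hk => hS k (List.mem_cons_of_mem _ hk)
    rw [List.foldl_cons]
    have hlen' : (pvStepA2 constraints current_connection_number net (cc0, i, j)).length = net.length := by
      unfold pvStepA2; split_ifs
      · rfl
      · rw [pvSet2_length, pvSet2_length]
    have hrow' : ∀ a, ((pvStepA2 constraints current_connection_number net (cc0, i, j)).getD a []).length = (net.getD a []).length := by
      intro a; unfold pvStepA2; split_ifs
      · rfl
      · rw [pvRow_len_set2, pvRow_len_set2]
    obtain ⟨⟨ihl, ihr⟩, ihc⟩ := ih (pvStepA2 constraints current_connection_number net (cc0, i, j)) hS'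
    refine ⟨⟨by rw [ihl, hlen'], fun a => by rw [ihr a, hrow' a]⟩, ?_⟩
    intro a b ha hb
    rw [ihc a b (by rw [hlen']; exact ha) (by rw [hrow']; exact hb)]
    by_cases hOK : pvOKb constraints current_connection_number a b = true
    · by_cases hmem : ((a, b) ∈ L.map (fun k => k.2) ∨ (b, a) ∈ L.map (fun k => k.2))
      · rw [if_pos ⟨hmem, hOK⟩, if_pos ⟨by
          rcases hmem with h | h
          · exact Or.inl (by simp [List.map_cons]; right; simpa using h)
          · exact Or.inr (by simp [List.map_cons]; right; simpa using h), hOK⟩]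
      · rw [if_neg (by rintro ⟨h, -⟩; exact hmem h)]
        obtain ⟨hOA, hOB⟩ : current_connection_number.getD a 0 ≠ constraints.getD a 0 ∧
            current_connection_number.getD b 0 ≠ constraints.getD b 0 := by
          simpa [pvOKb] using hOK
        by_cases h1 : a = i ∧ b = j
        · obtain ⟨rfl, rfl⟩ := h1
          have hg : ¬ (current_connection_number.getD a 0 = constraints.getD a 0 ∨
              current_connection_number.getD b 0 = constraints.getD b 0) := by tauto
          unfold pvStepA2
          rw [if_neg (by simpa using hg)]
          rw [pvGet2_set2, if_neg (by rintro ⟨rfl, -, -, -⟩; omega),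
            pvGet2_set2, if_pos ⟨rfl, rfl, ha, hb⟩]
          rw [if_pos ⟨Or.inl (by simp), hOK⟩]
        · by_cases h2 : a = j ∧ b = i
          · obtain ⟨rfl, rfl⟩ := h2
            have hg : ¬ (current_connection_number.getD b 0 = constraints.getD b 0 ∨
                current_connection_number.getD a 0 = constraints.getD a 0) := by tauto
            unfold pvStepA2
            rw [if_neg (by simpa using hg)]
            rw [pvGet2_set2, if_pos ⟨rfl, rfl, by rw [pvSet2_length]; exact ha, by rw [pvRow_len_set2]; exact hb⟩]
            rw [if_pos ⟨Or.inr (by simp), hOK⟩]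
          · have hne : pvGet2 (pvStepA2 constraints current_connection_number net (cc0, i, j)) a b = pvGet2 net a b := by
              unfold pvStepA2
              split_ifs with hg
              · rfl
              · rw [pvGet2_set2, if_neg (by rintro ⟨rfl, rfl, -, -⟩; exact h2 ⟨rfl, rfl⟩),
                  pvGet2_set2, if_neg (by rintro ⟨rfl, rfl, -, -⟩; exact h1 ⟨rfl, rfl⟩)]
            rw [hne, if_neg]
            rintro ⟨h, -⟩
            simp only [List.map_cons, List.mem_cons, List.mem_map, Prod.mk.injEq] at h
            rcases h with (⟨h3, h4⟩ | h3) | (⟨h3, h4⟩ | h3)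
            · exact h1 ⟨h3, h4⟩
            · exact hmem (Or.inl (by simpa using h3))
            · exact h2 ⟨h4, h3⟩
            · exact hmem (Or.inr (by simpa using h3))
    · rw [if_neg (by rintro ⟨-, h⟩; exact hOK h), if_neg (by rintro ⟨-, h⟩; exact hOK h)]
      obtain hOK' := fun (h1 : current_connection_number.getD a 0 ≠ constraints.getD a 0)
          (h2 : current_connection_number.getD b 0 ≠ constraints.getD b 0) =>
        hOK (by simp only [pvOKb, Bool.and_eq_true, bne_iff_ne, ne_eq]; exact ⟨h1, h2⟩)
      unfold pvStepA2
      split_ifs with hg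
      · rfl
      · rw [not_or] at hg
        rw [pvGet2_set2, if_neg ?_, pvGet2_set2, if_neg ?_]
        · rintro ⟨rfl, rfl, -, -⟩
          exact hOK' hg.1 hg.2
        · rintro ⟨rfl, rfl, -, -⟩
          exact hOK' hg.2 hg.1

theorem pvRowGet (m : List (List Int)) (a : Nat) (h : a < m.length) : m.getD a [] = m[a] := by
  rw [rowGetD_eq, List.getElem?_eq_getElem h, Option.getD_some]

theorem pvCellGet (l : List Int) (b : Nat) (h : b < l.length) : l.getD b 0 = l[b] := by
  rw [listGetD_eq, List.getElem?_eq_getElem h, Option.getD_some]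

-- B's matrix, cellwise: simple unfolding of the two maps
theorem altB_length (network : List (List Int)) (constraints current_connection_number : List Int) (costs : List (List Int)) :
    (increase_connectivity_alt network constraints current_connection_number costs).length = network.length := by
  simp [increase_connectivity_alt]

theorem altB_row (network : List (List Int)) (constraints current_connection_number : List Int) (costs : List (List Int))
    (a : Nat) (ha : a < network.length) :
    (increase_connectivity_alt network constraints current_connection_number costs)[a]'(by rw [altB_length]; exact ha) =
      (List.range (network.getD a []).length).map (fun j =>
        if a ≠ j ∧ j < network.length ∧ pvLinked network costs constraints current_connection_number (min a j) (max a j) = true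
        then 1 else pvGet2 network a j) := by
  simp [increase_connectivity_alt]

-- ===== VERDICT (by name: the statement is the Claim_ definition above) =====
theorem increase_connectivity_spec : Claim_equal_increase_connectivity := by
  intro network constraints ccn costs _ _
  unfold Spec_increase_connectivity
  have hA : increase_connectivity network constraints ccn costs =
      (PySem.List.sorted ((pvPairs network.length).foldl (pvStepA1 network) (costs, [])).2
        (fun t => t.1) false).foldl (pvStepA2 constraints ccn) network :=
    congrArg (fun st : List (List Int) × List (Int × Nat × Nat) =>
      (PySem.List.sorted st.2 (fun t => t.1) false).foldl (pvStepA2 constraints ccn) network)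
      (foldl_pvPairs (pvStepA1 network) network.length (costs, []))
  rw [hA]
  have havail : ((pvPairs network.length).foldl (pvStepA1 network) (costs, [])).2 =
      ((pvPairs network.length).filter (fun p => pvAvailb network costs p.1 p.2)).map
        (fun p => (pvGet2 costs p.1 p.2, p.1, p.2)) :=
    (phase1_avail network costs _ costs [] (nodup_pvPairs _) (fun _ _ => rfl)).trans
      (List.nil_append _)
  rw [havail]
  have hSmem : ∀ x, x ∈ PySem.List.sorted
        (((pvPairs network.length).filter (fun p => pvAvailb network costs p.1 p.2)).map
          (fun p => (pvGet2 costs p.1 p.2, p.1, p.2))) (fun t => t.1) false ↔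
      x ∈ ((pvPairs network.length).filter (fun p => pvAvailb network costs p.1 p.2)).map
          (fun p => (pvGet2 costs p.1 p.2, p.1, p.2)) :=
    fun x => PySem.List.mem_sorted _ _ _ _
  have hSstrict : ∀ k ∈ PySem.List.sorted
        (((pvPairs network.length).filter (fun p => pvAvailb network costs p.1 p.2)).map
          (fun p => (pvGet2 costs p.1 p.2, p.1, p.2))) (fun t => t.1) false, k.2.1 < k.2.2 := by
    intro k hk
    rw [hSmem] at hk
    obtain ⟨p, hp, rfl⟩ := List.mem_map.mp hk
    exact ((mem_pvPairs _ p).mp (List.mem_filter.mp hp).1).1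
  obtain ⟨⟨hAl, hAr⟩, hAc⟩ := phase2_char constraints ccn _ network hSstrict
  have hm : ∀ u v : Nat,
      ((u, v) ∈ (PySem.List.sorted
        (((pvPairs network.length).filter (fun p => pvAvailb network costs p.1 p.2)).map
          (fun p => (pvGet2 costs p.1 p.2, p.1, p.2))) (fun t => t.1) false).map (fun k => k.2)) ↔
      ((u, v) ∈ pvPairs network.length ∧ pvAvailb network costs u v = true) := by
    intro u v
    constructor
    · intro h
      obtain ⟨k, hk, hke⟩ := List.mem_map.mp h
      rw [hSmem] at hk
      obtain ⟨p, hp, rfl⟩ := List.mem_map.mp hk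
      obtain ⟨e1, e2⟩ : p.1 = u ∧ p.2 = v := by
        have : (p.1, p.2) = (u, v) := by simpa using hke
        exact ⟨congrArg Prod.fst this, congrArg Prod.snd this⟩
      obtain ⟨hp1, hp2⟩ := List.mem_filter.mp hp
      rw [← e1, ← e2, Prod.mk.eta]
      exact ⟨hp1, hp2⟩
    · rintro ⟨hpair, hav⟩
      exact List.mem_map.mpr ⟨(pvGet2 costs u v, u, v),
        (hSmem _).mpr (List.mem_map.mpr ⟨(u, v), List.mem_filter.mpr ⟨hpair, hav⟩, rfl⟩), rfl⟩
  apply List.ext_getElem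
  · rw [hAl, altB_length]
  · intro a h1 h2
    have ha' : a < network.length := by rw [hAl] at h1; exact h1
    rw [altB_row network constraints ccn costs a ha']
    apply List.ext_getElem
    · rw [← pvRowGet _ _ h1, hAr a, List.length_map, List.length_range]
    · intro b hb1 hb2
      have hb' : b < (network.getD a []).length := by
        simpa using hb2
      have e1 : (List.foldl (pvStepA2 constraints ccn)
          network (PySem.List.sorted
            (((pvPairs network.length).filter (fun p => pvAvailb network costs p.1 p.2)).map
              (fun p => (pvGet2 costs p.1 p.2, p.1, p.2))) (fun t => t.1) false))[a][b] =
          pvGet2 (List.foldl (pvStepA2 constraints ccn)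
          network (PySem.List.sorted
            (((pvPairs network.length).filter (fun p => pvAvailb network costs p.1 p.2)).map
              (fun p => (pvGet2 costs p.1 p.2, p.1, p.2))) (fun t => t.1) false)) a b := by
        rw [pvGet2, pvRowGet _ _ h1, pvCellGet _ _ hb1]
      rw [e1, hAc a b ha' hb']
      rw [List.getElem_map, List.getElem_range]
      have hOsym : pvOKb constraints ccn b a = pvOKb constraints ccn a b := by
        simp only [pvOKb]; exact Bool.and_comm ..
      by_cases hab : a < b
      · have hmin : min a b = a := by omega
        have hmax : max a b = b := by omega
        rw [hmin, hmax]
        refine if_congr ?_ rfl rfl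
        rw [hm a b, hm b a, mem_pvPairs, mem_pvPairs, pvLinked_eq_addb]
        simp only [pvAddb, Bool.and_eq_true]
        constructor
        · rintro ⟨(⟨⟨-, hbn⟩, hav⟩ | ⟨⟨h, -⟩, -⟩), hOK⟩
          · exact ⟨by omega, hbn, hav, hOK⟩
          · omega
        · rintro ⟨-, hbn, hav, hOK⟩
          exact ⟨Or.inl ⟨⟨hab, hbn⟩, hav⟩, hOK⟩
      · by_cases hba : b < a
        · have hmin : min a b = b := by omega
          have hmax : max a b = a := by omega
          rw [hmin, hmax]
          refine if_congr ?_ rfl rfl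
          rw [hm a b, hm b a, mem_pvPairs, mem_pvPairs, pvLinked_eq_addb]
          simp only [pvAddb, Bool.and_eq_true]
          constructor
          · rintro ⟨(⟨⟨h, -⟩, -⟩ | ⟨⟨-, -⟩, hav⟩), hOK⟩
            · omega
            · exact ⟨by omega, by omega, hav, by rw [hOsym]; exact hOK⟩
          · rintro ⟨-, -, hav, hOK⟩
            exact ⟨Or.inr ⟨⟨hba, ha'⟩, hav⟩, by rw [← hOsym]; exact hOK⟩
        · have heq : a = b := by omega
          subst heq
          rw [if_neg, if_neg]
          · rintro ⟨h, -, -⟩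
            exact h rfl
          · rintro ⟨h | h, -⟩ <;>
              · have := ((mem_pvPairs network.length (a, a)).mp ((hm a a).mp h).1).1
                omega
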